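-- pv_equiv track=rewrite | github.com/dionisos2/AdventOfCode | day14.py | create_coords
-- ===== SOURCE A (Python) =====
-- def create_coords(platform):
-- 	rows = list(range(len(platform)))
-- 	columns = list(range(len(platform)))
--
-- 	west_coords = [[(row, column) for column in columns] for row in rows]
-- 	east_coords = [[(row, column) for column in reversed(columns)] for row in rows]
-- 	north_coords = [[(row, column) for row in rows] for column in columns]
-- 	south_coords = [[(row, column) for row in reversed(rows)] for column in columns]
--
-- 	return (north_coords, west_coords, south_coords, east_coords)
-- ===== SOURCE B (Python) =====
-- def create_coords(platform):
--     n = len(platform)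
--     west_coords = [[(row, column) for column in range(n)] for row in range(n)]
--     east_coords = [row[::-1] for row in west_coords]
--     north_coords = [list(col) for col in zip(*west_coords)]
--     south_coords = [col[::-1] for col in north_coords]
--     return (north_coords, west_coords, south_coords, east_coords)
-- ===== Notes on version B (the rewrite author's own statement) =====
-- stated objective: simpler
-- what changed: B builds only the west grid with nested comprehensions; east and south are row reversals and north is a zip(*...) transpose of west, replacing three of A's four nested-comprehension passes.
import Mathlib
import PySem

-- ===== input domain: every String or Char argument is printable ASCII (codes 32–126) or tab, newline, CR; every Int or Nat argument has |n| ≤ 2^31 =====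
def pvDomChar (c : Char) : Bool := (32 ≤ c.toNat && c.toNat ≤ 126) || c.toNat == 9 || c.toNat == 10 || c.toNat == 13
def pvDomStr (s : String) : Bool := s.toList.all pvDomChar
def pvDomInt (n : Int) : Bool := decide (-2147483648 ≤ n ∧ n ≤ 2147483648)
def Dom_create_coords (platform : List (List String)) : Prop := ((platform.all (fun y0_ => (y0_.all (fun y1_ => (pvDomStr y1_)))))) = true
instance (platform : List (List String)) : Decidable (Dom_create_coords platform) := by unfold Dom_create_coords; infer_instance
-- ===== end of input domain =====

-- ===== PORT A =====
-- A builds all four grids with nested comprehensions over rows/columns = range(len(platform)).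
def create_coords (platform : List (List String)) : (List (List (Int × Int))) × (List (List (Int × Int))) × (List (List (Int × Int))) × (List (List (Int × Int))) :=
  let rows : List Int := (List.range platform.length).map Int.ofNat
  let columns : List Int := (List.range platform.length).map Int.ofNat
  let west_coords := rows.map (fun row => columns.map (fun column => (row, column)))
  let east_coords := rows.map (fun row => columns.reverse.map (fun column => (row, column)))
  let north_coords := columns.map (fun column => rows.map (fun row => (row, column)))
  let south_coords := columns.map (fun column => rows.reverse.map (fun row => (row, column)))
  (north_coords, west_coords, south_coords, east_coords)

-- ===== PORT B =====
-- hand-written port of Python's zip(*m) (truncates at the shortest row); exact for this use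
def pyZipAux {α : Type} [Inhabited α] : List α → List (List α) → List (List α)
  | [], _ => []
  | a :: as', rest =>
      if rest.any (·.isEmpty) then []
      else (a :: rest.map List.headI) :: pyZipAux as' (rest.map List.tail)

def pyZipStar {α : Type} [Inhabited α] : List (List α) → List (List α)
  | [] => []
  | r :: rs => pyZipAux r rs

-- B: build west only; east/south by row reversal ([::-1]), north by zip(*west) transpose.
def create_coords_alt (platform : List (List String)) : (List (List (Int × Int))) × (List (List (Int × Int))) × (List (List (Int × Int))) × (List (List (Int × Int))) :=
  let n := platform.length
  let rows : List Int := (List.range n).map Int.ofNat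
  let west_coords := rows.map (fun row => rows.map (fun column => (row, column)))
  let east_coords := west_coords.map List.reverse
  let north_coords := pyZipStar west_coords
  let south_coords := north_coords.map List.reverse
  (north_coords, west_coords, south_coords, east_coords)

-- ===== PRECONDITION & SPEC =====
def Spec_create_coords (platform : List (List String)) (out : (List (List (Int × Int))) × (List (List (Int × Int))) × (List (List (Int × Int))) × (List (List (Int × Int)))) : Prop := out = create_coords_alt platform
instance (platform : List (List String)) (out : (List (List (Int × Int))) × (List (List (Int × Int))) × (List (List (Int × Int))) × (List (List (Int × Int)))) : Decidable (Spec_create_coords platform out) := by unfold Spec_create_coords; infer_instance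

-- ===== CLAIM (what is proved, stated in full; the proofs are below) =====
def Claim_equal_create_coords : Prop := ∀ (platform : List (List String)), Dom_create_coords platform → Spec_create_coords platform (create_coords platform)

-- ===== LEMMAS AND PROOFS =====

-- transposing a rectangular grid built by rows gives the grid built by columns
theorem pyZipAux_grid (a : Int) (as' bs : List Int) :
    pyZipAux (bs.map (fun b => (a, b))) (as'.map (fun a' => bs.map (fun b => (a', b)))) =
    bs.map (fun b => (a, b) :: as'.map (fun a' => (a', b))) := by
  induction bs generalizing a with
  | nil => simp [pyZipAux]
  | cons b bs' ih =>
      simp only [List.map_cons, pyZipAux]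
      rw [if_neg (by simp)]
      simp only [List.map_map, Function.comp_def, List.headI, List.tail_cons]
      rw [ih a]

theorem pyZipStar_grid (as bs : List Int) (h : as.length = bs.length) :
    pyZipStar (as.map (fun a => bs.map (fun b => (a, b)))) =
    bs.map (fun b => as.map (fun a => (a, b))) := by
  cases as with
  | nil => cases bs with
    | nil => simp [pyZipStar]
    | cons b bs' => simp at h
  | cons a as' =>
      simp only [List.map_cons, pyZipStar]
      rw [pyZipAux_grid]

-- ===== VERDICT (by name: the statement is the Claim_ definition above) =====
theorem create_coords_spec : Claim_equal_create_coords := by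
  intro platform _
  unfold Spec_create_coords create_coords create_coords_alt
  simp only
  refine Prod.ext ?_ (Prod.ext rfl (Prod.ext ?_ ?_))
  · rw [pyZipStar_grid _ _ rfl]
  · rw [pyZipStar_grid _ _ rfl]
    simp [List.map_reverse]
  · simp [List.map_reverse]
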